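-- pv_equiv track=rewrite | github.com/stepleton/bootloader | dc42_build_bootable_disk.py | _permute_data_and_tags_for_sony_800k
-- ===== SOURCE A (Python) =====
-- def _permute_data_and_tags_for_sony_800k(data, tags):
--   """Put sector and tag data in the correct order for Sony 800k .dc42 images.
--
--   In Sony 800k .dc42 disk image files, the data from both sides of the disk
--   are interleaved on a track-by-track basis. (That is, the disk image contains
--   the sectors from side 1 track 0, followed by those from side 2 track 0,
--   followed by side 1 track 1, then side 2 track 1, then side 1 track 2, side 2
--   track 2, and so on. The tag data are arranged similarly.)
--
--   In contrast, when this program marshals sector and track data, it assumes that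
--   the data and tags are arranged in track order for side 1, followed by track
--   order for side 2. (This is correct for BLU Twiggy image files, and trivially
--   correct for single-sided Sony 400k images.)
--
--   This function permutes the contiguous sector and tag data in the arguments
--   to obtain the side-interleaved sector and tag data required for a Sony 800k
--   .dc42 disk image file.
--
--   Args:
--     data: 800k of side-contiguous sector data.
--     tags: 19.2k of side-contiguous tag data.
--
--   Returns: a 2-tuple whose elements are the sector and tag data permuted into
--       the correct .dc42 disk image ordering.
--   """
--
--   # The number of sectors in track t on a 400k disk (or on one side of an 800k
--   # disk) can be referenced in this table as track_sizes[t]: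
--   track_sizes = 0x10*[0xC] + 0x10*[0xB] + 0x10*[0xA] + 0x10*[0x9] + 0x10*[0x8]
--
--   # This is a pretty silly (O(N^2)) way to compute the cumulative sum of a
--   # list, but it's adequate for our needs, and best of all, very short.
--   cumsum = lambda l: [sum(l[:n+1]) for n in range(len(l))]
--
--   # Derived from track_sizes: bounds for the sector and tag data in `data` and
--   # `tags` associated with track t on the first/only side of an 800k/400k disk.
--   track_data_bounds = cumsum([0] + [0x200 * s for s in track_sizes])
--   track_data_begins = track_data_bounds[:-1]
--   track_data_ends   = track_data_bounds[1:]
--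
--   track_tags_bounds = cumsum([0] + [0xc * s for s in track_sizes])
--   track_tags_begins = track_tags_bounds[:-1]
--   track_tags_ends   = track_tags_bounds[1:]
--
--   # Riffle tracks from the first and second half of `data` to obtain the sector
--   # data as it should appear in the dc42 file for a double-sided disk.
--   permuted_data = []
--   for s1_track_begin, s1_track_end in zip(track_data_begins, track_data_ends):
--     s2_track_begin = s1_track_begin + 0x64000
--     s2_track_end   = s1_track_end   + 0x64000
--     permuted_data.append(data[s1_track_begin:s1_track_end])
--     permuted_data.append(data[s2_track_begin:s2_track_end])
--
--   # Likewise for tag data.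
--   permuted_tags = []
--   for s1_track_begin, s1_track_end in zip(track_tags_begins, track_tags_ends):
--     s2_track_begin = s1_track_begin + 0x2580
--     s2_track_end   = s1_track_end   + 0x2580
--     permuted_tags.append(tags[s1_track_begin:s1_track_end])
--     permuted_tags.append(tags[s2_track_begin:s2_track_end])
--
--   # Merge and return all permuted tags.
--   data = ''.join(permuted_data)
--   tags = ''.join(permuted_tags)
--   return data, tags
-- ===== SOURCE B (Python) =====
-- def _permute_data_and_tags_for_sony_800k(data, tags):
--   """Interleave the two disk sides' sector and tag data track by track."""
--   track_sizes = 16*[0xC] + 16*[0xB] + 16*[0xA] + 16*[0x9] + 16*[0x8]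
--
--   def riffle(s, unit, half):
--     # Split into the two sides first, then consume both sides chunk by chunk,
--     # emitting each track's side-1 and side-2 pieces already glued together.
--     side1, side2 = s[:half], s[half:]
--     pieces = []
--     for n in track_sizes:
--       k = unit * n
--       pieces.append(side1[:k] + side2[:k])
--       side1, side2 = side1[k:], side2[k:]
--     return ''.join(pieces)
--
--   return riffle(data, 0x200, 0x64000), riffle(tags, 0xc, 0x2580)
-- ===== Notes on version B (the rewrite author's own statement) =====
-- stated objective: alternative
-- what changed: Instead of precomputing O(T^2) prefix-sum bounds tables and slicing the original string at absolute offsets for each side, B splits the input into its two side halves up front and then consumes both halves simultaneously, chopping one track-sized chunk off each side per step and emitting them glued together, via a riffle helper shared by data and tags.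
import Mathlib
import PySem

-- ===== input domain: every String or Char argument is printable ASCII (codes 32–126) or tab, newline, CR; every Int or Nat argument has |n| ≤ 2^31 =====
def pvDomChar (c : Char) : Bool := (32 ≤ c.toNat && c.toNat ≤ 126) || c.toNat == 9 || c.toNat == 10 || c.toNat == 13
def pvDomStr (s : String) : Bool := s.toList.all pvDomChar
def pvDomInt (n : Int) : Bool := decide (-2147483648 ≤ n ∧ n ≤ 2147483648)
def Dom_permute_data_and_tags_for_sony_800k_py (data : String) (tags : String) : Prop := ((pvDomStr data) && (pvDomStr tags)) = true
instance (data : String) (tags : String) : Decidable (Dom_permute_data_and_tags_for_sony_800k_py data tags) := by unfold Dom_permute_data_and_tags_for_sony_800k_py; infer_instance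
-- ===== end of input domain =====

-- B replaces A's precomputed prefix-sum bounds tables and absolute-offset slicing by splitting the
-- input into its two side halves up front and consuming both halves chunk by chunk with a shared
-- riffle helper (objective: alternative decomposition, same asymptotic cost).

-- ===== PORT A =====
-- A-side helpers: the constants A computes before its loops (argument-independent).
def pyA_track_sizes : List Int :=
  PySem.List.pyRepeat [0xC] 0x10 ++ PySem.List.pyRepeat [0xB] 0x10 ++
  PySem.List.pyRepeat [0xA] 0x10 ++ PySem.List.pyRepeat [0x9] 0x10 ++
  PySem.List.pyRepeat [0x8] 0x10

-- cumsum = lambda l: [sum(l[:n+1]) for n in range(len(l))]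
def pyA_cumsum (l : List Int) : List Int :=
  (PySem.List.pyRange 0 (l.length : Int) 1).map
    (fun n => (PySem.List.slice l none (some (n + 1))).sum)

def pyA_track_data_bounds : List Int := pyA_cumsum ([0] ++ pyA_track_sizes.map (fun s => 0x200 * s))
def pyA_track_data_begins : List Int := PySem.List.slice pyA_track_data_bounds none (some (-1))
def pyA_track_data_ends   : List Int := PySem.List.slice pyA_track_data_bounds (some 1) none

def pyA_track_tags_bounds : List Int := pyA_cumsum ([0] ++ pyA_track_sizes.map (fun s => 0xc * s))
def pyA_track_tags_begins : List Int := PySem.List.slice pyA_track_tags_bounds none (some (-1))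
def pyA_track_tags_ends   : List Int := PySem.List.slice pyA_track_tags_bounds (some 1) none

def permute_data_and_tags_for_sony_800k_py (data : String) (tags : String) : String × String :=
  let permuted_data :=
    (pyA_track_data_begins.zip pyA_track_data_ends).foldl
      (fun acc be =>
        (acc ++ [PySem.Str.slice data (some be.1) (some be.2)]) ++
          [PySem.Str.slice data (some (be.1 + 0x64000)) (some (be.2 + 0x64000))]) []
  let permuted_tags :=
    (pyA_track_tags_begins.zip pyA_track_tags_ends).foldl
      (fun acc be =>
        (acc ++ [PySem.Str.slice tags (some be.1) (some be.2)]) ++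
          [PySem.Str.slice tags (some (be.1 + 0x2580)) (some (be.2 + 0x2580))]) []
  (PySem.Str.join "" permuted_data, PySem.Str.join "" permuted_tags)

-- ===== PORT B =====
def pyB_track_sizes : List Int :=
  PySem.List.pyRepeat [0xC] 16 ++ PySem.List.pyRepeat [0xB] 16 ++
  PySem.List.pyRepeat [0xA] 16 ++ PySem.List.pyRepeat [0x9] 16 ++
  PySem.List.pyRepeat [0x8] 16

-- riffle(s, unit, half): split s into its two side halves, then chop one track-sized
-- chunk off each side per step, emitting the two pieces glued together ('+' = join "").
def pyB_riffle (s : String) (unit : Int) (half : Int) : String :=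
  let side1 := PySem.Str.slice s none (some half)
  let side2 := PySem.Str.slice s (some half) none
  let st :=
    pyB_track_sizes.foldl
      (fun (st : String × String × List String) n =>
        let k := unit * n
        (PySem.Str.slice st.1 (some k) none,
         PySem.Str.slice st.2.1 (some k) none,
         st.2.2 ++ [PySem.Str.join "" [PySem.Str.slice st.1 none (some k),
                                       PySem.Str.slice st.2.1 none (some k)]]))
      (side1, side2, [])
  PySem.Str.join "" st.2.2

def permute_data_and_tags_for_sony_800k_py_alt (data : String) (tags : String) : String × String :=
  (pyB_riffle data 0x200 0x64000, pyB_riffle tags 0xc 0x2580)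

-- ===== PRECONDITION & SPEC =====
def Spec_permute_data_and_tags_for_sony_800k_py (data : String) (tags : String) (out : String × String) : Prop := out = permute_data_and_tags_for_sony_800k_py_alt data tags
instance (data : String) (tags : String) (out : String × String) : Decidable (Spec_permute_data_and_tags_for_sony_800k_py data tags out) := by unfold Spec_permute_data_and_tags_for_sony_800k_py; infer_instance

-- ===== CLAIM (what is proved, stated in full; the proofs are below) =====
def Claim_equal_permute_data_and_tags_for_sony_800k_py : Prop := ∀ (data : String) (tags : String), Dom_permute_data_and_tags_for_sony_800k_py data tags → Spec_permute_data_and_tags_for_sony_800k_py data tags (permute_data_and_tags_for_sony_800k_py data tags)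

-- ===== LEMMAS AND PROOFS =====

theorem join_nil_sep (l : List (List Char)) : PySem.Chars.join [] l = l.flatten := by
  induction l with
  | nil => rfl
  | cons x xs ih =>
    cases xs with
    | nil => simp [PySem.Chars.join, List.intercalate]
    | cons y ys =>
      rw [PySem.Chars.join_cons_cons] at *
      simp_all [List.flatten]

def genPairs (u : Int) (pos : Int) : List Int → List (Int × Int)
  | [] => []
  | n :: rest => (pos, pos + u * n) :: genPairs u (pos + u * n) rest



theorem riffle_loop (s : String) (u N : Int) (hu : 0 ≤ u) (hN : 0 ≤ N) :
    ∀ (sizes : List Int) (pn : Nat) (s1 s2 : String) (accA accB : List String),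
    (∀ n ∈ sizes, 0 ≤ n) →
    ((pn : Int) + u * sizes.sum ≤ N) →
    s1.toList = (s.toList.take N.toNat).drop pn →
    s2.toList = s.toList.drop (N.toNat + pn) →
    (accA.map String.toList).flatten = (accB.map String.toList).flatten →
    ((List.foldl
        (fun acc (be : Int × Int) =>
          (acc ++ [PySem.Str.slice s (some be.1) (some be.2)]) ++
            [PySem.Str.slice s (some (be.1 + N)) (some (be.2 + N))])
        accA (genPairs u (pn : Int) sizes)).map String.toList).flatten
      = (((List.foldl
            (fun (st : String × String × List String) n =>
              let k := u * n
              (PySem.Str.slice st.1 (some k) none,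
               PySem.Str.slice st.2.1 (some k) none,
               st.2.2 ++ [PySem.Str.join "" [PySem.Str.slice st.1 none (some k),
                                             PySem.Str.slice st.2.1 none (some k)]]))
            (s1, s2, accB) sizes).2.2).map String.toList).flatten := by
  intro sizes
  induction sizes with
  | nil =>
    intro pn s1 s2 accA accB _ _ _ _ hacc
    simpa [genPairs] using hacc
  | cons n rest ih =>
    intro pn s1 s2 accA accB hnn hsum hs1 hs2 hacc
    have hn : 0 ≤ n := hnn n (by simp)
    have hrest : ∀ m ∈ rest, 0 ≤ m := fun m hm => hnn m (by simp [hm])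
    have hk : 0 ≤ u * n := mul_nonneg hu hn
    have hrs : 0 ≤ u * rest.sum := mul_nonneg hu (List.sum_nonneg hrest)
    rw [List.sum_cons, mul_add] at hsum
    obtain ⟨kn, hkNat⟩ : ∃ kn : Nat, u * n = (kn : Int) :=
      ⟨(u * n).toNat, (Int.toNat_of_nonneg hk).symm⟩
    obtain ⟨rs, hrsNat⟩ : ∃ rs : Nat, u * rest.sum = (rs : Int) :=
      ⟨(u * rest.sum).toNat, (Int.toNat_of_nonneg hrs).symm⟩
    rw [hkNat, hrsNat] at hsum
    have hkn : kn ≤ N.toNat - pn := by omega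
    have hcast : ((pn + kn : Nat) : Int) = (pn : Int) + (kn : Int) := by push_cast; ring
    simp only [genPairs, List.foldl_cons]
    rw [hkNat, ← hcast]
    refine ih (pn + kn) _ _ _ _ hrest ?_ ?_ ?_ ?_
    · rw [hcast, hrsNat]; omega
    · simp only [PySem.Str.toList_slice, PySem.Chars.slice_eq_listSlice,
        PySem.List.slice_from _ (by positivity : (0:Int) ≤ (kn : Int)),
        Int.toNat_natCast, hs1, List.drop_drop]
    · simp only [PySem.Str.toList_slice, PySem.Chars.slice_eq_listSlice,
        PySem.List.slice_from _ (by positivity : (0:Int) ≤ (kn : Int)),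
        Int.toNat_natCast, hs2, List.drop_drop, Nat.add_assoc]
    · -- acc invariant: the two new chunks agree
      have e0 : ("" : String).toList = ([] : List Char) := rfl
      have eA1 : (PySem.Str.slice s (some (pn : Int)) (some ((pn + kn : Nat) : Int))).toList
          = (s.toList.drop pn).take kn := by
        rw [PySem.Str.toList_slice, PySem.Chars.slice_eq_listSlice,
          PySem.List.slice_toNat _ (by positivity) (by positivity)]
        congr 1
        omega
      have eB1 : (PySem.Str.slice s1 none (some (kn : Int))).toList
          = (s.toList.drop pn).take kn := by
        rw [PySem.Str.toList_slice, PySem.Chars.slice_eq_listSlice,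
          PySem.List.slice_to _ (by positivity), Int.toNat_natCast, hs1,
          List.drop_take, List.take_take, min_eq_left hkn]
      have eA2 : (PySem.Str.slice s (some ((pn : Int) + N)) (some (((pn + kn : Nat) : Int) + N))).toList
          = (s.toList.drop (N.toNat + pn)).take kn := by
        rw [PySem.Str.toList_slice, PySem.Chars.slice_eq_listSlice,
          PySem.List.slice_toNat _ (by omega) (by omega)]
        congr 1
        · omega
        · congr 1
          omega
      have eB2 : (PySem.Str.slice s2 none (some (kn : Int))).toList
          = (s.toList.drop (N.toNat + pn)).take kn := by
        rw [PySem.Str.toList_slice, PySem.Chars.slice_eq_listSlice,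
          PySem.List.slice_to _ (by positivity), Int.toNat_natCast, hs2]
      simp only [List.map_append, List.flatten_append, List.map_cons, List.map_nil,
        List.flatten_cons, List.flatten_nil, hacc, PySem.Str.toList_join, e0,
        join_nil_sep, eA1, eA2, eB1, eB2, List.append_assoc, List.append_nil]


set_option maxRecDepth 10000 in
theorem pyA_data_pairs_eval :
    pyA_track_data_begins.zip pyA_track_data_ends = [(0, 6144), (6144, 12288), (12288, 18432), (18432, 24576), (24576, 30720), (30720, 36864), (36864, 43008), (43008, 49152), (49152, 55296), (55296, 61440), (61440, 67584), (67584, 73728), (73728, 79872), (79872, 86016), (86016, 92160), (92160, 98304), (98304, 103936), (103936, 109568), (109568, 115200), (115200, 120832), (120832, 126464), (126464, 132096), (132096, 137728), (137728, 143360), (143360, 148992), (148992, 154624), (154624, 160256), (160256, 165888), (165888, 171520), (171520, 177152), (177152, 182784), (182784, 188416), (188416, 193536), (193536, 198656), (198656, 203776), (203776, 208896), (208896, 214016), (214016, 219136), (219136, 224256), (224256, 229376), (229376, 234496), (234496, 239616), (239616, 244736), (244736, 249856), (249856, 254976), (254976, 260096), (260096, 265216), (265216, 270336), (270336, 274944),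 (274944, 279552), (279552, 284160), (284160, 288768), (288768, 293376), (293376, 297984), (297984, 302592), (302592, 307200), (307200, 311808), (311808, 316416), (316416, 321024), (321024, 325632), (325632, 330240), (330240, 334848), (334848, 339456), (339456, 344064), (344064, 348160), (348160, 352256), (352256, 356352), (356352, 360448), (360448, 364544), (364544, 368640), (368640, 372736), (372736, 376832), (376832, 380928), (380928, 385024), (385024, 389120), (389120, 393216), (393216, 397312), (397312, 401408), (401408, 405504), (405504, 409600)] := by decide

set_option maxRecDepth 10000 in
theorem pyA_tags_pairs_eval :
    pyA_track_tags_begins.zip pyA_track_tags_ends = [(0, 144), (144, 288), (288, 432), (432, 576), (576, 720), (720, 864), (864, 1008), (1008, 1152), (1152, 1296), (1296, 1440), (1440, 1584), (1584, 1728), (1728, 1872), (1872, 2016), (2016, 2160), (2160, 2304), (2304, 2436), (2436, 2568), (2568, 2700), (2700, 2832), (2832, 2964), (2964, 3096), (3096, 3228), (3228, 3360), (3360, 3492), (3492, 3624), (3624, 3756), (3756, 3888), (3888, 4020), (4020, 4152), (4152, 4284), (4284, 4416), (4416, 4536), (4536, 4656), (4656, 4776), (4776, 4896), (4896, 5016),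 (5016, 5136), (5136, 5256), (5256, 5376), (5376, 5496), (5496, 5616), (5616, 5736), (5736, 5856), (5856, 5976), (5976, 6096), (6096, 6216), (6216, 6336), (6336, 6444), (6444, 6552), (6552, 6660), (6660, 6768), (6768, 6876), (6876, 6984), (6984, 7092), (7092, 7200), (7200, 7308), (7308, 7416), (7416, 7524), (7524, 7632), (7632, 7740), (7740, 7848), (7848, 7956), (7956, 8064), (8064, 8160), (8160, 8256), (8256, 8352), (8352, 8448), (8448, 8544), (8544, 8640), (8640, 8736), (8736, 8832), (8832, 8928), (8928, 9024), (9024, 9120), (9120, 9216), (9216, 9312), (9312, 9408), (9408, 9504), (9504, 9600)] := by decide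

set_option maxRecDepth 10000 in
theorem genPairs_data_eval :
    genPairs 512 ((0 : Nat) : Int) pyB_track_sizes = [(0, 6144), (6144, 12288), (12288, 18432), (18432, 24576), (24576, 30720), (30720, 36864), (36864, 43008), (43008, 49152), (49152, 55296), (55296, 61440), (61440, 67584), (67584, 73728), (73728, 79872), (79872, 86016), (86016, 92160), (92160, 98304), (98304, 103936), (103936, 109568), (109568, 115200), (115200, 120832), (120832, 126464), (126464, 132096), (132096, 137728), (137728, 143360), (143360, 148992), (148992, 154624), (154624, 160256), (160256, 165888), (165888, 171520), (171520, 177152), (177152, 182784), (182784, 188416), (188416, 193536), (193536, 198656), (198656, 203776), (203776, 208896), (208896, 214016), (214016, 219136), (219136, 224256), (224256, 229376), (229376, 234496), (234496, 239616), (239616, 244736), (244736, 249856), (249856, 254976), (254976, 260096), (260096, 265216), (265216, 270336), (270336, 274944), (274944, 279552), (279552, 284160), (284160, 288768), (288768, 293376), (293376, 297984), (297984, 302592), (302592, 307200), (307200, 311808), (311808, 316416), (316416, 321024), (321024, 325632), (325632, 330240), (330240, 334848), (334848, 339456), (339456, 344064), (344064, 348160), (348160, 352256), (352256, 356352), (356352,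 360448), (360448, 364544), (364544, 368640), (368640, 372736), (372736, 376832), (376832, 380928), (380928, 385024), (385024, 389120), (389120, 393216), (393216, 397312), (397312, 401408), (401408, 405504), (405504, 409600)] := by decide

set_option maxRecDepth 10000 in
theorem genPairs_tags_eval :
    genPairs 12 ((0 : Nat) : Int) pyB_track_sizes = [(0, 144), (144, 288), (288, 432), (432, 576), (576, 720), (720, 864), (864, 1008), (1008, 1152), (1152, 1296), (1296, 1440), (1440, 1584), (1584, 1728), (1728, 1872), (1872, 2016), (2016, 2160), (2160, 2304), (2304, 2436), (2436, 2568), (2568, 2700), (2700, 2832), (2832, 2964), (2964, 3096), (3096, 3228), (3228, 3360), (3360, 3492), (3492, 3624), (3624, 3756), (3756, 3888), (3888, 4020), (4020, 4152), (4152, 4284), (4284, 4416), (4416, 4536), (4536, 4656), (4656, 4776), (4776, 4896), (4896, 5016), (5016, 5136), (5136, 5256), (5256, 5376), (5376, 5496), (5496, 5616), (5616, 5736), (5736, 5856), (5856, 5976), (5976, 6096), (6096, 6216), (6216, 6336), (6336, 6444), (6444, 6552), (6552, 6660), (6660, 6768), (6768, 6876), (6876, 6984), (6984, 7092), (7092,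 7200), (7200, 7308), (7308, 7416), (7416, 7524), (7524, 7632), (7632, 7740), (7740, 7848), (7848, 7956), (7956, 8064), (8064, 8160), (8160, 8256), (8256, 8352), (8352, 8448), (8448, 8544), (8544, 8640), (8640, 8736), (8736, 8832), (8832, 8928), (8928, 9024), (9024, 9120), (9120, 9216), (9216, 9312), (9312, 9408), (9408, 9504), (9504, 9600)] := by decide

-- ===== VERDICT (by name: the statement is the Claim_ definition above) =====
set_option maxRecDepth 10000 in
theorem permute_data_and_tags_for_sony_800k_py_spec : Claim_equal_permute_data_and_tags_for_sony_800k_py := by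
  intro data tags _
  unfold Spec_permute_data_and_tags_for_sony_800k_py
  simp only [permute_data_and_tags_for_sony_800k_py, permute_data_and_tags_for_sony_800k_py_alt,
    pyB_riffle]
  rw [pyA_data_pairs_eval, pyA_tags_pairs_eval, ← genPairs_data_eval, ← genPairs_tags_eval]
  have e0 : ("" : String).toList = ([] : List Char) := rfl
  refine Prod.ext ?_ ?_ <;>
  · apply String.toList_inj.mp
    rw [PySem.Str.toList_join, PySem.Str.toList_join, e0, join_nil_sep, join_nil_sep]
    refine riffle_loop _ _ _ (by norm_num) (by norm_num) pyB_track_sizes 0 _ _ [] []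
      (by decide) (by decide) ?_ ?_ rfl
    · simp [PySem.Str.toList_slice, PySem.List.slice_to _ (by norm_num : (0:Int) ≤ 409600),
        PySem.List.slice_to _ (by norm_num : (0:Int) ≤ 9600)]
    · simp [PySem.Str.toList_slice, PySem.List.slice_from _ (by norm_num : (0:Int) ≤ 409600),
        PySem.List.slice_from _ (by norm_num : (0:Int) ≤ 9600)]
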